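-- pv_equiv track=rewrite | github.com/Jerrythafast/strnaming | strnaming/libstrnaming.py | recurse_find_longest_repeat
-- ===== SOURCE A (Python) =====
-- NAMING_OPTIONS = {
--     "min_repeats": 2,
--     "min_repeat_length": 8,
--     "min_structure_length": 20,
--     "max_unit_length": 6,
--     "max_gap": 8,
--     "max_long_gap": 20,
--     "bases_covered_factor": 0.15874379,
--     "units_used_factor": -10.1786473,
--     "units_used_multiplier": 1.09052798,
--     "repeats_factor": 3.49237881,
--     "preferred_repeats_factor": 0.65040629,
--     "interruptions_factor": -9.56645361,
--     "interruptions_multiplier": 1.41646677,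
--     "nice_interruptions_factor": 7.27483601,
--     "interruption_bases_factor": -0.56939138,
--     "prefix_suffix_factor": -1.785957
-- }
--
-- def detect_repeats(seq):
--     """
--     Return a matrix of max_unit_length x len(seq) elements.
--     The value at position (j,i) gives the length of a repeat of units of
--     length j (in number of units), ending in position i in the sequence.
--     This function will only accept repeats of min_repeats or more units;
--     it will report a length of 1 for any repeat shorter than this.
--     """
--     len_seq = len(seq)
--     matrix = [[0]*len_seq for j in range(NAMING_OPTIONS["max_unit_length"])]
--     for i in range(len_seq):
--         for j in range(NAMING_OPTIONS["max_unit_length"]):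
--             if i <= j:
--                 matrix[j][i] = i + 1  # No full unit yet.
--             elif seq[i] != seq[i - j - 1]:
--                 matrix[j][i] = j + 1  # Restart counting.
--             else:
--                 matrix[j][i] = matrix[j][i - 1] + 1
--     for i in range(len_seq):
--         for j in range(NAMING_OPTIONS["max_unit_length"]):
--             matrix[j][i] //= (j + 1)
--             if 0 < matrix[j][i] < NAMING_OPTIONS["min_repeats"]:
--                 matrix[j][i] = 1;  # Ignore, too short.
--     return matrix
--
-- def find_longest_repeat(matrix):
--     """
--     Get start and end position and unit length of the longest repeat in
--     matrix.  Break ties by choosing the shortest unit, the earliest in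
--     the sequence (lowest indices into matrix).
--     """
--     maxes = [(((max(row)-1) or -1) + 1) * (j + 1) for j, row in enumerate(matrix)]
--     max_len = max(maxes)
--     max_unit = maxes.index(max_len)
--     max_end = matrix[max_unit].index(max(matrix[max_unit])) + 1
--     max_start = max_end - max_len
--     return max_start, max_end, max_unit + 1
--
-- def recurse_find_longest_repeat(seq, matrix=None):
--     """Generate tuples of (repeat length, unit length)."""
--     # Find the longest repeat in the sequence.
--     if matrix is None:
--         matrix = detect_repeats(seq)
--     start, end, unit = find_longest_repeat(matrix)
--
--     # Degenerate case: no repeat found.  Short-circuit.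
--     length = end - start
--     if length < NAMING_OPTIONS["min_repeat_length"] or length < NAMING_OPTIONS["min_repeats"] * unit:
--         yield (len(seq), len(seq))
--         return
--
--     # First, recursively yield any parts prior to the found repeat.
--     if start:
--         for prefix in recurse_find_longest_repeat(seq[:start], [row[:start] for row in matrix]):
--             yield prefix
--
--     # Then, yield the repeat that was found in this call.
--     yield (length, unit)
--
--     # Finally, recursively yield any parts after the found repeat.
--     if end < len(seq):
--         for suffix in recurse_find_longest_repeat(seq[end:], detect_repeats(seq[end:])):
--             yield suffix
-- ===== SOURCE B (Python) =====
-- NAMING_OPTIONS = {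
--     "min_repeats": 2,
--     "min_repeat_length": 8,
--     "max_unit_length": 6,
-- }
--
-- def detect_repeats(seq):
--     len_seq = len(seq)
--     matrix = [[0]*len_seq for j in range(NAMING_OPTIONS["max_unit_length"])]
--     for i in range(len_seq):
--         for j in range(NAMING_OPTIONS["max_unit_length"]):
--             if i <= j:
--                 matrix[j][i] = i + 1
--             elif seq[i] != seq[i - j - 1]:
--                 matrix[j][i] = j + 1
--             else:
--                 matrix[j][i] = matrix[j][i - 1] + 1
--     for i in range(len_seq):
--         for j in range(NAMING_OPTIONS["max_unit_length"]):
--             matrix[j][i] //= (j + 1)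
--             if 0 < matrix[j][i] < NAMING_OPTIONS["min_repeats"]:
--                 matrix[j][i] = 1
--     return matrix
--
-- def find_longest_repeat(matrix):
--     maxes = [(((max(row)-1) or -1) + 1) * (j + 1) for j, row in enumerate(matrix)]
--     max_len = max(maxes)
--     max_unit = maxes.index(max_len)
--     max_end = matrix[max_unit].index(max(matrix[max_unit])) + 1
--     max_start = max_end - max_len
--     return max_start, max_end, max_unit + 1
--
-- def recurse_find_longest_repeat(seq, matrix=None):
--     """Generate tuples of (repeat length, unit length), iteratively via a LIFO work stack."""
--     stack = [("process", seq, matrix)]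
--     while stack:
--         item = stack.pop()
--         if item[0] == "emit":
--             yield item[1]
--             continue
--         _, s, m = item
--         if m is None:
--             m = detect_repeats(s)
--         start, end, unit = find_longest_repeat(m)
--         length = end - start
--         if (length < NAMING_OPTIONS["min_repeat_length"]
--                 or length < NAMING_OPTIONS["min_repeats"] * unit):
--             yield (len(s), len(s))
--             continue
--         # push in reverse of the desired output order: suffix, repeat, prefix
--         if end < len(s):
--             stack.append(("process", s[end:], detect_repeats(s[end:])))
--         stack.append(("emit", (length, unit)))
--         if start:
--             stack.append(("process", s[:start], [row[:start] for row in m]))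
--     return
-- ===== Notes on version B (the rewrite author's own statement) =====
-- stated objective: alternative
-- what changed: Replaces the recursive generator with an iterative LIFO work-stack loop that pushes suffix/emit/prefix work items in reverse output order and yields identical tuples without recursion.
import Mathlib
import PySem

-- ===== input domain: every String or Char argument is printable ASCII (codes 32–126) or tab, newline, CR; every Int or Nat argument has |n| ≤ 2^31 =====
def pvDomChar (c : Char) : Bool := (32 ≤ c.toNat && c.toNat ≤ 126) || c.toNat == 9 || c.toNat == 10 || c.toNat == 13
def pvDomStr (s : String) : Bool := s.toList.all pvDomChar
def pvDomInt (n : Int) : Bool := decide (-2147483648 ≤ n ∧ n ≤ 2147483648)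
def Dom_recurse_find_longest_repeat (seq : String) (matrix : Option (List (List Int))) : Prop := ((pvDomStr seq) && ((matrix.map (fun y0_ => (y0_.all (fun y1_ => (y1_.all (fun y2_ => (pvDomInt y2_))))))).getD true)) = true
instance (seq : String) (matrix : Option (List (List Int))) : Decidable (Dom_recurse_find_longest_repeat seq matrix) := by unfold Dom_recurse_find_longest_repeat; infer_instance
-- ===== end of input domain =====

-- B restructures A's recursive generator into an iterative LIFO work-stack loop (same values, same order); equivalence is about the returned list of tuples.

-- ===== PORT A =====

-- detect_repeats, first loop (i outer, j inner; each cell (j,i) is written once, reading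
-- cell (j,i-1), so the row grows by one entry per i; seq[i], seq[i-j-1] are in range here,
-- hence List.getD is exact).
def pvDetectStep1 (seq : List Char) : List (List Int) :=
  (List.range seq.length).foldl
    (fun mat (i : Nat) => mat.zipIdx.map (fun rj =>
      rj.1 ++ [ if i ≤ rj.2 then (i : Int) + 1
                else if seq.getD i ' ' ≠ seq.getD (i - rj.2 - 1) ' ' then (rj.2 : Int) + 1
                else (rj.1.getLast?.getD 0) + 1 ]))
    (List.replicate 6 [])

-- detect_repeats, second loop: matrix[j][i] //= (j+1), then clamp 0 < x < 2 to 1.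
def pvDetect (seq : List Char) : List (List Int) :=
  (pvDetectStep1 seq).zipIdx.map (fun rj => rj.1.map (fun v =>
    let w := PySem.Int.floordiv v ((rj.2 : Int) + 1)
    if 0 < w ∧ w < 2 then 1 else w))

-- find_longest_repeat (Python 'x or -1' on an int is 'if x ≠ 0 then x else -1';
-- the .getD defaults stand for the ValueError of max()/[] indexing on empty input,
-- which Pre_ excludes).
def pvFLR (matrix : List (List Int)) : Int × Int × Int :=
  let maxes := matrix.zipIdx.map (fun rj =>
    let mx := (PySem.List.max? rj.1 (fun x => x)).getD 0
    ((if mx - 1 ≠ 0 then mx - 1 else (-1 : Int)) + 1) * ((rj.2 : Int) + 1))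
  let max_len := (PySem.List.max? maxes (fun x => x)).getD 0
  let max_unit := (PySem.List.index? maxes max_len).getD 0
  let row := matrix.getD max_unit []
  let max_end : Int := ((PySem.List.index? row ((PySem.List.max? row (fun x => x)).getD 0)).getD 0 : Int) + 1
  (max_end - max_len, max_end, (max_unit : Int) + 1)

-- A's recursion (fuel only makes it total; seq.length + 1 levels suffice on Pre_ inputs).
def pvRecA : Nat → List Char → List (List Int) → List (Int × Int)
  | 0, _, _ => []
  | n+1, seq, matrix =>
    let r := pvFLR matrix
    let length := r.2.1 - r.1
    if length < 8 ∨ length < 2 * r.2.2 then [((seq.length : Int), (seq.length : Int))]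
    else
      (if r.1 ≠ 0 then
         pvRecA n (PySem.List.slice seq none (some r.1))
                  (matrix.map (fun row => PySem.List.slice row none (some r.1)))
       else [])
      ++ (length, r.2.2) ::
      (if r.2.1 < (seq.length : Int) then
         pvRecA n (PySem.List.slice seq (some r.2.1) none)
                  (pvDetect (PySem.List.slice seq (some r.2.1) none))
       else [])

def recurse_find_longest_repeat (seq : String) (matrix : Option (List (List Int))) : List (Int × Int) :=
  pvRecA (seq.toList.length + 1) seq.toList (matrix.getD (pvDetect seq.toList))

-- ===== PORT B =====

-- work items of Source B's explicit stack: ("process", s, m) / ("emit", t)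
inductive PvItem where
  | proc : List Char → Option (List (List Int)) → PvItem
  | emit : Int × Int → PvItem

-- Source B's while-loop over the stack; list head = top of stack, so items are consed in
-- output order (Source B appends them in reverse).  acc collects yielded tuples (reversed).
-- Fuel decreases only on "process" items; it only makes the loop total.
def pvRunB : Nat → List PvItem → List (Int × Int) → List (Int × Int)
  | _, [], acc => acc.reverse
  | fuel, .emit t :: rest, acc => pvRunB fuel rest (t :: acc)
  | 0, .proc _ _ :: _, acc => acc.reverse
  | fuel+1, .proc s mOpt :: rest, acc =>
    let m := mOpt.getD (pvDetect s)
    let r := pvFLR m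
    let length := r.2.1 - r.1
    if length < 8 ∨ length < 2 * r.2.2 then
      pvRunB fuel rest (((s.length : Int), (s.length : Int)) :: acc)
    else
      pvRunB fuel
        ((if r.1 ≠ 0 then
            [PvItem.proc (PySem.List.slice s none (some r.1))
                         (some (m.map (fun row => PySem.List.slice row none (some r.1))))]
          else []) ++
         PvItem.emit (length, r.2.2) ::
         (if r.2.1 < (s.length : Int) then
            [PvItem.proc (PySem.List.slice s (some r.2.1) none)
                         (some (pvDetect (PySem.List.slice s (some r.2.1) none)))]
          else []) ++ rest) acc
  termination_by fuel stack _ => (fuel, stack.length)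

def recurse_find_longest_repeat_alt (seq : String) (matrix : Option (List (List Int))) : List (Int × Int) :=
  pvRunB (seq.toList.length + 1) [PvItem.proc seq.toList matrix] []

-- ===== PRECONDITION & SPEC =====

-- Pre_ excludes the empty sequence with matrix=None (A's max() raises ValueError there) and
-- caller-supplied matrices that are empty, contain an empty row, or admit a normalised repeat
-- length ≥ 8: such inconsistent matrices drive A's recursion through leftover negative-index
-- slicing that usually raises ValueError on an emptied row, and which of them return is not a
-- closed-form condition, so the whole non-degenerate caller-matrix region is excluded (the
-- only callers in the repository pass matrix=None).
def Pre_recurse_find_longest_repeat (seq : String) (matrix : Option (List (List Int))) : Prop :=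
  (matrix = none → seq ≠ "") ∧
  ∀ m ∈ matrix.toList, m ≠ [] ∧ (∀ row ∈ m, row ≠ []) ∧
    ∀ p ∈ m.zipIdx, ∀ x ∈ p.1, x * ((p.2 : Int) + 1) < 8

instance (seq : String) (matrix : Option (List (List Int))) : Decidable (Pre_recurse_find_longest_repeat seq matrix) := by
  unfold Pre_recurse_find_longest_repeat; infer_instance

def pvWitness_recurse_find_longest_repeat : String × Option (List (List Int)) := ("TCTATCTATCTA", none)

def Spec_recurse_find_longest_repeat (seq : String) (matrix : Option (List (List Int))) (out : List (Int × Int)) : Prop := out = recurse_find_longest_repeat_alt seq matrix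
instance (seq : String) (matrix : Option (List (List Int))) (out : List (Int × Int)) : Decidable (Spec_recurse_find_longest_repeat seq matrix out) := by unfold Spec_recurse_find_longest_repeat; infer_instance

-- ===== CLAIM (what is proved, stated in full; the proofs are below) =====
def Claim_equal_recurse_find_longest_repeat : Prop := ∀ (seq : String) (matrix : Option (List (List Int))), Dom_recurse_find_longest_repeat seq matrix → Pre_recurse_find_longest_repeat seq matrix → Spec_recurse_find_longest_repeat seq matrix (recurse_find_longest_repeat seq matrix)

-- ===== LEMMAS AND PROOFS =====

-- The invariant tying a matrix to its sequence: 6 rows of the sequence's length whose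
-- entries are nonnegative and satisfy  entry * (unit length) ≤ position + 1  (which is what
-- detect_repeats produces and what slicing preserves; it forces find_longest_repeat to
-- return 0 ≤ start ≤ end ≤ len(seq)).
def pvGood (s : List Char) (m : List (List Int)) : Prop :=
  s ≠ [] ∧ m.length = 6 ∧
  ∀ j (hj : j < m.length), (m[j]).length = s.length ∧
    ∀ i (hi : i < (m[j]).length), 0 ≤ (m[j])[i] ∧ (m[j])[i] * ((j : Int) + 1) ≤ (i : Int) + 1

-- Dissection of find_longest_repeat on a nonempty matrix with nonempty rows:
-- it returns (end - L, end, mu + 1) with end = idx + 1 for an in-range cell (mu, idx),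
-- and L is 0 or the value of that cell times (mu + 1).
theorem pvFLR_cases (m : List (List Int)) (hm : m ≠ []) (hrows : ∀ row ∈ m, row ≠ []) :
    ∃ (mu idx : Nat) (h1 : mu < m.length) (h2 : idx < (m[mu]).length) (L : Int),
      pvFLR m = ((idx : Int) + 1 - L, ((idx : Int) + 1, (mu : Int) + 1)) ∧
      (L = 0 ∨ L = (m[mu])[idx] * ((mu : Int) + 1)) := by
  have hmlen : 0 < m.length := List.length_pos_iff.mpr hm
  set maxes : List Int := m.zipIdx.map (fun rj =>
    let mx := (PySem.List.max? rj.1 (fun x => x)).getD 0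
    ((if mx - 1 ≠ 0 then mx - 1 else (-1 : Int)) + 1) * ((rj.2 : Int) + 1)) with hmaxes
  have hmaxlen : maxes.length = m.length := by simp [hmaxes]
  have hmaxne : maxes ≠ [] := by
    intro hnil; rw [hnil] at hmaxlen; simp at hmaxlen; omega
  obtain ⟨L, hL⟩ : ∃ L, PySem.List.max? maxes (fun x => x) = some L := by
    cases hc : PySem.List.max? maxes (fun x => x) with
    | none => exact absurd ((PySem.List.max?_eq_none_iff maxes _).mp hc) hmaxne
    | some L => exact ⟨L, rfl⟩
  have hLmem : L ∈ maxes := PySem.List.max?_mem hL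
  obtain ⟨mu, hmu⟩ : ∃ mu, PySem.List.index? maxes L = some mu := by
    cases hc : PySem.List.index? maxes L with
    | none =>
      have h2 := (PySem.List.index?_isSome_iff maxes L).mpr hLmem
      rw [hc] at h2; simp at h2
    | some mu => exact ⟨mu, rfl⟩
  obtain ⟨hmu_lt, hmaxes_mu, -⟩ := PySem.List.getElem_of_index?_eq_some hmu
  have hmu_m : mu < m.length := by omega
  have hrow_ne : m[mu] ≠ [] := hrows _ (List.getElem_mem hmu_m)
  obtain ⟨v, hv⟩ : ∃ v, PySem.List.max? (m[mu]) (fun x => x) = some v := by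
    cases hc : PySem.List.max? (m[mu]) (fun x => x) with
    | none => exact absurd ((PySem.List.max?_eq_none_iff _ _).mp hc) hrow_ne
    | some v => exact ⟨v, rfl⟩
  have hvmem : v ∈ m[mu] := PySem.List.max?_mem hv
  obtain ⟨idx, hidx⟩ : ∃ idx, PySem.List.index? (m[mu]) v = some idx := by
    cases hc : PySem.List.index? (m[mu]) v with
    | none =>
      have h2 := (PySem.List.index?_isSome_iff _ v).mpr hvmem
      rw [hc] at h2; simp at h2
    | some idx => exact ⟨idx, rfl⟩
  obtain ⟨hidx_lt, hrow_idx, -⟩ := PySem.List.getElem_of_index?_eq_some hidx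
  -- value of maxes[mu]
  have hzl : mu < m.zipIdx.length := by simpa using hmu_m
  have hz : m.zipIdx[mu] = (m[mu], mu) := by simpa using List.getElem_zipIdx hzl
  have hmaxes_val : maxes[mu]'hmu_lt =
      ((if v - 1 ≠ 0 then v - 1 else (-1 : Int)) + 1) * ((mu : Int) + 1) := by
    simp only [hmaxes, List.getElem_map, List.getElem_zipIdx]
    simp [hv]
  have hLval : L = ((if v - 1 ≠ 0 then v - 1 else (-1 : Int)) + 1) * ((mu : Int) + 1) := by
    rw [← hmaxes_mu, hmaxes_val]
  have hgetD : m.getD mu [] = m[mu] := List.getD_eq_getElem m [] hmu_m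
  refine ⟨mu, idx, hmu_m, hidx_lt, L, ?_, ?_⟩
  · show pvFLR m = _
    rw [pvFLR]
    simp only [← hmaxes, hL, Option.getD_some, hmu, hgetD, hv, hidx]
  · by_cases h1 : v - 1 ≠ 0
    · right; rw [hLval, hrow_idx, if_pos h1]; ring
    · left; rw [hLval]; simp at h1; simp [h1]

theorem pvFLR_good (s : List Char) (m : List (List Int)) (h : pvGood s m) :
    0 ≤ (pvFLR m).1 ∧ (pvFLR m).1 ≤ (pvFLR m).2.1 ∧ 1 ≤ (pvFLR m).2.1 ∧
      (pvFLR m).2.1 ≤ (s.length : Int) := by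
  obtain ⟨hs_ne, hm6, hcell⟩ := h
  have hslen : 0 < s.length := List.length_pos_iff.mpr hs_ne
  have hm : m ≠ [] := by intro h0; rw [h0] at hm6; simp at hm6
  have hrows : ∀ row ∈ m, row ≠ [] := by
    intro row hr
    obtain ⟨j, hj, hrj⟩ := List.mem_iff_getElem.mp hr
    have hlen := (hcell j hj).1
    intro hnil
    rw [hrj, hnil] at hlen
    simp at hlen
    omega
  obtain ⟨mu, idx, h1, h2, L, hE, hLd⟩ := pvFLR_cases m hm hrows
  have hrlen : (m[mu]).length = s.length := (hcell mu h1).1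
  have hidx_s : idx < s.length := by omega
  have hcb := (hcell mu h1).2 idx h2
  have hL0 : 0 ≤ L := by
    rcases hLd with h0 | h0
    · omega
    · rw [h0]; exact mul_nonneg hcb.1 (by positivity)
  have hLe : L ≤ (idx : Int) + 1 := by
    rcases hLd with h0 | h0
    · omega
    · rw [h0]; exact hcb.2
  rw [hE]
  dsimp only
  refine ⟨by omega, by omega, by omega, by omega⟩

-- On a Pre_-admitted caller matrix every normalised repeat length is < 8 (degenerate case).
theorem pvFLR_small (m : List (List Int)) (hm : m ≠ []) (hrows : ∀ row ∈ m, row ≠ [])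
    (hb : ∀ p ∈ m.zipIdx, ∀ x ∈ p.1, x * ((p.2 : Int) + 1) < 8) :
    (pvFLR m).2.1 - (pvFLR m).1 < 8 := by
  obtain ⟨mu, idx, h1, h2, L, hE, hLd⟩ := pvFLR_cases m hm hrows
  rw [hE]
  dsimp only
  have hL8 : L < 8 := by
    rcases hLd with h0 | h0
    · omega
    · rw [h0]
      have hzl : mu < m.zipIdx.length := by simpa using h1
      have hz : m.zipIdx[mu] = (m[mu], mu) := by simpa using List.getElem_zipIdx hzl
      have hmem : (m[mu], mu) ∈ m.zipIdx := by rw [← hz]; exact List.getElem_mem hzl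
      exact hb _ hmem _ (List.getElem_mem h2)
  omega

theorem pvDetectStep1_inv (s : List Char) :
    (pvDetectStep1 s).length = 6 ∧
    ∀ j (hj : j < (pvDetectStep1 s).length),
      ((pvDetectStep1 s)[j]).length = s.length ∧
      ∀ i (hi : i < ((pvDetectStep1 s)[j]).length),
        1 ≤ ((pvDetectStep1 s)[j])[i] ∧ ((pvDetectStep1 s)[j])[i] ≤ (i : Int) + 1 := by
  have key : ∀ k : Nat,
      ((List.range k).foldl
        (fun mat (i : Nat) => mat.zipIdx.map (fun rj =>
          rj.1 ++ [ if i ≤ rj.2 then (i : Int) + 1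
                    else if s.getD i ' ' ≠ s.getD (i - rj.2 - 1) ' ' then (rj.2 : Int) + 1
                    else (rj.1.getLast?.getD 0) + 1 ]))
        (List.replicate 6 [])).length = 6 ∧
      ∀ j (hj : j < ((List.range k).foldl
        (fun mat (i : Nat) => mat.zipIdx.map (fun rj =>
          rj.1 ++ [ if i ≤ rj.2 then (i : Int) + 1
                    else if s.getD i ' ' ≠ s.getD (i - rj.2 - 1) ' ' then (rj.2 : Int) + 1
                    else (rj.1.getLast?.getD 0) + 1 ]))
        (List.replicate 6 [])).length),
        (((List.range k).foldl
        (fun mat (i : Nat) => mat.zipIdx.map (fun rj =>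
          rj.1 ++ [ if i ≤ rj.2 then (i : Int) + 1
                    else if s.getD i ' ' ≠ s.getD (i - rj.2 - 1) ' ' then (rj.2 : Int) + 1
                    else (rj.1.getLast?.getD 0) + 1 ]))
        (List.replicate 6 []))[j]).length = k ∧
        ∀ i (hi : i < (((List.range k).foldl
        (fun mat (i : Nat) => mat.zipIdx.map (fun rj =>
          rj.1 ++ [ if i ≤ rj.2 then (i : Int) + 1
                    else if s.getD i ' ' ≠ s.getD (i - rj.2 - 1) ' ' then (rj.2 : Int) + 1
                    else (rj.1.getLast?.getD 0) + 1 ]))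
        (List.replicate 6 []))[j]).length),
          1 ≤ ((((List.range k).foldl
        (fun mat (i : Nat) => mat.zipIdx.map (fun rj =>
          rj.1 ++ [ if i ≤ rj.2 then (i : Int) + 1
                    else if s.getD i ' ' ≠ s.getD (i - rj.2 - 1) ' ' then (rj.2 : Int) + 1
                    else (rj.1.getLast?.getD 0) + 1 ]))
        (List.replicate 6 []))[j])[i]) ∧
          ((((List.range k).foldl
        (fun mat (i : Nat) => mat.zipIdx.map (fun rj =>
          rj.1 ++ [ if i ≤ rj.2 then (i : Int) + 1
                    else if s.getD i ' ' ≠ s.getD (i - rj.2 - 1) ' ' then (rj.2 : Int) + 1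
                    else (rj.1.getLast?.getD 0) + 1 ]))
        (List.replicate 6 []))[j])[i]) ≤ (i : Int) + 1 := by
    intro k
    induction k with
    | zero =>
      constructor
      · simp
      · intro j hj
        simp only [List.range_zero, List.foldl_nil] at hj ⊢
        constructor
        · simp only [List.getElem_replicate]; rfl
        · intro i hi
          rw [List.getElem_replicate] at hi
          simp at hi
    | succ k ih =>
      obtain ⟨ihlen, ihcell⟩ := ih
      rw [List.range_succ, List.foldl_append]
      generalize hM : (List.range k).foldl
        (fun mat (i : Nat) => mat.zipIdx.map (fun rj =>
          rj.1 ++ [ if i ≤ rj.2 then (i : Int) + 1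
                    else if s.getD i ' ' ≠ s.getD (i - rj.2 - 1) ' ' then (rj.2 : Int) + 1
                    else (rj.1.getLast?.getD 0) + 1 ]))
        (List.replicate 6 []) = M at ihlen ihcell ⊢
      simp only [List.foldl_cons, List.foldl_nil]
      have hlen' : (M.zipIdx.map (fun rj =>
          rj.1 ++ [ if k ≤ rj.2 then (k : Int) + 1
                    else if s.getD k ' ' ≠ s.getD (k - rj.2 - 1) ' ' then (rj.2 : Int) + 1
                    else (rj.1.getLast?.getD 0) + 1 ])).length = 6 := by
        simp [ihlen]
      refine ⟨hlen', ?_⟩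
      intro j hj
      have hjM : j < M.length := by simp at hj; omega
      have hjz : j < M.zipIdx.length := by simpa using hjM
      have hz : M.zipIdx[j] = (M[j], j) := by simpa using List.getElem_zipIdx hjz
      have hgj : ∀ (hjj : j < (M.zipIdx.map (fun rj =>
          rj.1 ++ [ if k ≤ rj.2 then (k : Int) + 1
                    else if s.getD k ' ' ≠ s.getD (k - rj.2 - 1) ' ' then (rj.2 : Int) + 1
                    else (rj.1.getLast?.getD 0) + 1 ])).length),
          (M.zipIdx.map (fun rj =>
          rj.1 ++ [ if k ≤ rj.2 then (k : Int) + 1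
                    else if s.getD k ' ' ≠ s.getD (k - rj.2 - 1) ' ' then (rj.2 : Int) + 1
                    else (rj.1.getLast?.getD 0) + 1 ]))[j] =
          M[j] ++ [ if k ≤ j then (k : Int) + 1
                    else if s.getD k ' ' ≠ s.getD (k - j - 1) ' ' then (j : Int) + 1
                    else ((M[j]).getLast?.getD 0) + 1 ] := by
        intro hjj
        rw [List.getElem_map, hz]
      obtain ⟨ihl, ihb⟩ := ihcell j hjM
      simp only [hgj hj]
      have hvalb : 1 ≤ (if k ≤ j then (k : Int) + 1
                    else if s.getD k ' ' ≠ s.getD (k - j - 1) ' ' then (j : Int) + 1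
                    else ((M[j]).getLast?.getD 0) + 1) ∧
                   (if k ≤ j then (k : Int) + 1
                    else if s.getD k ' ' ≠ s.getD (k - j - 1) ' ' then (j : Int) + 1
                    else ((M[j]).getLast?.getD 0) + 1) ≤ (k : Int) + 1 := by
        split
        · constructor <;> omega
        · split
          · rename_i hkj _
            constructor
            · omega
            · have : (j : Int) < (k : Int) := by exact_mod_cast Nat.lt_of_not_le hkj
              omega
          · rename_i hkj _
            have hk1 : 1 ≤ k := by omega
            have hk1' : k - 1 < (M[j]).length := by omega
            have hlast : (M[j]).getLast?.getD 0 = (M[j])[k-1] := by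
              have hne : M[j] ≠ [] := by
                intro h0; rw [h0] at ihl; simp at ihl; omega
              rw [List.getLast?_eq_getElem?]
              rw [List.getElem?_eq_getElem (by omega)]
              simp [ihl]
            rw [hlast]
            have hb := ihb (k-1) hk1'
            have hcast : ((k - 1 : Nat) : Int) = (k : Int) - 1 := by omega
            rw [hcast] at hb
            constructor <;> omega
      constructor
      · simp [ihl]
      · intro i hi
        simp [ihl] at hi
        rcases Nat.lt_or_ge i k with hik | hik
        · rw [List.getElem_append_left (by omega)]
          exact ihb i (by omega)
        · have hik' : i = k := by omega
          subst hik'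
          rw [List.getElem_append_right (by omega)]
          simp only [ihl, Nat.sub_self, List.getElem_cons_zero]
          exact hvalb
  rw [pvDetectStep1]
  exact key s.length

theorem pvDetect_good (s : List Char) (hs : s ≠ []) : pvGood s (pvDetect s) := by
  obtain ⟨h6, hcell⟩ := pvDetectStep1_inv s
  refine ⟨hs, by simp [pvDetect, h6], ?_⟩
  intro j hj
  have hjs : j < (pvDetectStep1 s).length := by
    simp only [pvDetect, List.length_map, List.length_zipIdx] at hj; omega
  have hjz : j < (pvDetectStep1 s).zipIdx.length := by simpa using hjs
  have hz : (pvDetectStep1 s).zipIdx[j] = ((pvDetectStep1 s)[j], j) := by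
    simpa using List.getElem_zipIdx hjz
  have hrow : ∀ (hjj : j < (pvDetect s).length), (pvDetect s)[j] =
      ((pvDetectStep1 s)[j]).map (fun v =>
        let w := PySem.Int.floordiv v ((j : Int) + 1)
        if 0 < w ∧ w < 2 then 1 else w) := by
    intro hjj
    simp only [pvDetect, List.getElem_map, hz]
  obtain ⟨ihl, ihb⟩ := hcell j hjs
  simp only [hrow hj]
  constructor
  · simp [ihl]
  · intro i hi
    simp only [List.length_map] at hi
    have hb := ihb i hi
    simp only [List.getElem_map]
    have hjpos : (0 : Int) < (j : Int) + 1 := by positivity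
    have hfd : PySem.Int.floordiv (((pvDetectStep1 s)[j])[i]) ((j : Int) + 1) =
        ((pvDetectStep1 s)[j])[i] / ((j : Int) + 1) :=
      PySem.Int.floordiv_eq_ediv_of_pos hjpos
    rw [hfd]
    have hmod := Int.emod_nonneg (((pvDetectStep1 s)[j])[i]) (ne_of_gt hjpos)
    have hdm := Int.mul_ediv_add_emod (((pvDetectStep1 s)[j])[i]) ((j : Int) + 1)
    have hw0 : 0 ≤ ((pvDetectStep1 s)[j])[i] / ((j : Int) + 1) :=
      Int.ediv_nonneg (by omega) (by omega)
    have hwle : (((pvDetectStep1 s)[j])[i] / ((j : Int) + 1)) * ((j : Int) + 1) ≤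
        ((pvDetectStep1 s)[j])[i] := by
      nlinarith [hdm, hmod]
    split
    · rename_i hcond
      have hw1 : ((pvDetectStep1 s)[j])[i] / ((j : Int) + 1) = 1 := by omega
      rw [hw1] at hwle
      constructor
      · omega
      · rw [one_mul]
        rw [one_mul] at hwle
        omega
    · exact ⟨hw0, by omega⟩

theorem pvGood_pre (s : List Char) (m : List (List Int)) (h : pvGood s m) (s0 : Int)
    (h0 : 0 < s0) (hlt : s0 ≤ (s.length : Int)) :
    pvGood (PySem.List.slice s none (some s0))
      (m.map (fun row => PySem.List.slice row none (some s0))) := by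
  obtain ⟨hs_ne, hm6, hcell⟩ := h
  have h0' : (0 : Int) ≤ s0 := le_of_lt h0
  simp only [PySem.List.slice_to _ h0']
  have ht1 : 1 ≤ s0.toNat := by omega
  have hts : s0.toNat ≤ s.length := by omega
  refine ⟨?_, by simp [hm6], ?_⟩
  · have : (s.take s0.toNat).length = s0.toNat := by simp; omega
    intro h0n; rw [h0n] at this; simp at this; omega
  · intro j hj
    have hjm : j < m.length := by simpa using hj
    have hrow : ∀ (hjj : j < (m.map (fun row => row.take s0.toNat)).length),
        (m.map (fun row => row.take s0.toNat))[j] = (m[j]).take s0.toNat := by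
      intro hjj; rw [List.getElem_map]
    obtain ⟨ihl, ihb⟩ := hcell j hjm
    simp only [hrow hj]
    constructor
    · simp [ihl]
    · intro i hi
      simp only [List.length_take] at hi
      have hii : i < (m[j]).length := by omega
      rw [List.getElem_take]
      exact ihb i hii

theorem pvStep_facts (s : List Char) (m : List (List Int)) (h : pvGood s m)
    (hnd : ¬((pvFLR m).2.1 - (pvFLR m).1 < 8 ∨
             (pvFLR m).2.1 - (pvFLR m).1 < 2 * (pvFLR m).2.2)) :
    0 ≤ (pvFLR m).1 ∧ 8 ≤ (pvFLR m).2.1 - (pvFLR m).1 ∧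
      (pvFLR m).2.1 ≤ (s.length : Int) ∧ 1 ≤ (pvFLR m).2.1 := by
  push Not at hnd
  have := pvFLR_good s m h
  exact ⟨this.1, hnd.1, this.2.2.2, this.2.2.1⟩

-- Packaged facts about one non-degenerate step on a good matrix: integer start/end are
-- Nat-valued with start + 8 ≤ end ≤ len(s), and the prefix/suffix work items are good again.
theorem pvStep_main (s : List Char) (m : List (List Int)) (h : pvGood s m)
    (hnd : ¬((pvFLR m).2.1 - (pvFLR m).1 < 8 ∨
             (pvFLR m).2.1 - (pvFLR m).1 < 2 * (pvFLR m).2.2)) :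
    ∃ (st et : Nat), (pvFLR m).1 = (st : Int) ∧ (pvFLR m).2.1 = (et : Int) ∧
      st + 8 ≤ et ∧ et ≤ s.length ∧
      (st ≠ 0 →
        pvGood (PySem.List.slice s none (some (pvFLR m).1))
          (m.map (fun row => PySem.List.slice row none (some (pvFLR m).1))) ∧
        (PySem.List.slice s none (some (pvFLR m).1)).length = st) ∧
      ((pvFLR m).2.1 < (s.length : Int) →
        pvGood (PySem.List.slice s (some (pvFLR m).2.1) none)
          (pvDetect (PySem.List.slice s (some (pvFLR m).2.1) none)) ∧
        (PySem.List.slice s (some (pvFLR m).2.1) none).length = s.length - et) := by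
  obtain ⟨hs0, h8, hen, he1⟩ := pvStep_facts s m h hnd
  refine ⟨(pvFLR m).1.toNat, (pvFLR m).2.1.toNat, by omega, by omega, by omega, by omega, ?_, ?_⟩
  · intro hst
    have h0 : (0 : Int) < (pvFLR m).1 := by omega
    refine ⟨pvGood_pre s m h _ h0 (by omega), ?_⟩
    rw [PySem.List.slice_to _ (le_of_lt h0)]
    simp
    omega
  · intro het
    have h0 : (0 : Int) ≤ (pvFLR m).2.1 := by omega
    rw [PySem.List.slice_from _ h0]
    have hlen : (s.drop (pvFLR m).2.1.toNat).length = s.length - (pvFLR m).2.1.toNat := by simp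
    refine ⟨pvDetect_good _ ?_, hlen⟩
    intro hnil
    rw [hnil] at hlen
    simp at hlen
    omega

-- A's fuel is irrelevant as long as it exceeds the sequence length (on pvGood inputs).
theorem pvRecA_stable : ∀ (N : Nat) (s : List Char) (m : List (List Int)),
    s.length ≤ N → pvGood s m → ∀ n₁ n₂, s.length < n₁ → s.length < n₂ →
    pvRecA n₁ s m = pvRecA n₂ s m := by
  intro N
  induction N with
  | zero =>
    intro s m hle hg
    have : s = [] := List.eq_nil_of_length_eq_zero (by omega)
    exact absurd this hg.1
  | succ N ih =>
    intro s m hle hg n₁ n₂ h1 h2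
    obtain ⟨k₁, rfl⟩ : ∃ k, n₁ = k + 1 := ⟨n₁ - 1, by omega⟩
    obtain ⟨k₂, rfl⟩ : ∃ k, n₂ = k + 1 := ⟨n₂ - 1, by omega⟩
    simp only [pvRecA]
    by_cases hc : (pvFLR m).2.1 - (pvFLR m).1 < 8 ∨
        (pvFLR m).2.1 - (pvFLR m).1 < 2 * (pvFLR m).2.2
    · rw [if_pos hc, if_pos hc]
    · rw [if_neg hc, if_neg hc]
      obtain ⟨st, et, hstE, hetE, h8, hen, hpre, hpost⟩ := pvStep_main s m hg hc
      congr 1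
      · by_cases hst : (pvFLR m).1 ≠ 0
        · rw [if_pos hst, if_pos hst]
          have hst' : st ≠ 0 := by omega
          obtain ⟨hgood', hlen'⟩ := hpre hst'
          exact ih _ _ (by omega) hgood' _ _ (by omega) (by omega)
        · rw [if_neg hst, if_neg hst]
      · congr 1
        by_cases het : (pvFLR m).2.1 < (s.length : Int)
        · rw [if_pos het, if_pos het]
          obtain ⟨hgood', hlen'⟩ := hpost het
          exact ih _ _ (by omega) hgood' _ _ (by omega) (by omega)
        · rw [if_neg het, if_neg het]

-- B's stack loop, run on a good process item, consumes at most len(s) units of fuel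
-- (fuel decreases only on process items) and appends A's output (reversed) to the accumulator.
theorem pvRunB_key : ∀ (N : Nat) (s : List Char) (mOpt : Option (List (List Int))),
    s.length ≤ N → pvGood s (mOpt.getD (pvDetect s)) →
    ∀ fb rest acc, s.length ≤ fb →
    ∃ c f', fb = f' + c ∧ c ≤ s.length ∧
      pvRunB fb (PvItem.proc s mOpt :: rest) acc =
        pvRunB f' rest ((pvRecA (s.length + 1) s (mOpt.getD (pvDetect s))).reverse ++ acc) := by
  intro N
  induction N with
  | zero =>
    intro s mOpt hle hg
    have : s = [] := List.eq_nil_of_length_eq_zero (by omega)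
    exact absurd this hg.1
  | succ N ih =>
    intro s mOpt hle hg fb rest acc hfb
    have hs1 : 1 ≤ s.length := by
      rcases s with _ | ⟨a, t⟩
      · exact absurd rfl hg.1
      · simp
    obtain ⟨f, rfl⟩ : ∃ f, fb = f + 1 := ⟨fb - 1, by omega⟩
    simp only [pvRunB, pvRecA]
    set m := mOpt.getD (pvDetect s) with hm
    by_cases hc : (pvFLR m).2.1 - (pvFLR m).1 < 8 ∨
        (pvFLR m).2.1 - (pvFLR m).1 < 2 * (pvFLR m).2.2
    · rw [if_pos hc, if_pos hc]
      exact ⟨1, f, rfl, by omega, by simp⟩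
    · rw [if_neg hc, if_neg hc]
      obtain ⟨st, et, hstE, hetE, h8, hen, hpre, hpost⟩ := pvStep_main s m hg hc
      have hemit : ∀ (fe : Nat) (stk : List PvItem) (ac : List (Int × Int)) (t : Int × Int),
          pvRunB fe (PvItem.emit t :: stk) ac = pvRunB fe stk (t :: ac) := by
        intro fe stk ac t
        rcases fe with _ | fe <;> simp [pvRunB]
      by_cases hst : (pvFLR m).1 ≠ 0
      case neg =>
        rw [if_neg hst, if_neg hst]
        simp only [List.nil_append, List.cons_append]
        rw [hemit]
        by_cases het : (pvFLR m).2.1 < (s.length : Int)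
        case neg =>
          rw [if_neg het, if_neg het]
          simp only [List.nil_append]
          exact ⟨1, f, rfl, by omega, by simp⟩
        case pos =>
          rw [if_pos het, if_pos het]
          simp only [List.singleton_append]
          obtain ⟨hgood2, hlen2⟩ := hpost het
          obtain ⟨c2, f2, hf2, hc2, heq2⟩ := ih (PySem.List.slice s (some (pvFLR m).2.1) none)
            (some (pvDetect (PySem.List.slice s (some (pvFLR m).2.1) none)))
            (by omega) (by simpa using hgood2) f rest
            (((pvFLR m).2.1 - (pvFLR m).1, (pvFLR m).2.2) :: acc) (by omega)
          simp only [Option.getD_some] at heq2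
          rw [pvRecA_stable N (PySem.List.slice s (some (pvFLR m).2.1) none)
            (pvDetect (PySem.List.slice s (some (pvFLR m).2.1) none)) (by omega) hgood2
            ((PySem.List.slice s (some (pvFLR m).2.1) none).length + 1) s.length
            (by omega) (by omega)] at heq2
          refine ⟨1 + c2, f2, by omega, by omega, ?_⟩
          rw [heq2]
          congr 1
          simp
      case pos =>
        rw [if_pos hst, if_pos hst]
        have hst' : st ≠ 0 := by omega
        obtain ⟨hgoodp, hlenp⟩ := hpre hst'
        obtain ⟨c1, f1, hf1, hc1, heq1⟩ := ih (PySem.List.slice s none (some (pvFLR m).1))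
          (some (m.map (fun row => PySem.List.slice row none (some (pvFLR m).1))))
          (by omega) (by simpa using hgoodp) f
          (PvItem.emit ((pvFLR m).2.1 - (pvFLR m).1, (pvFLR m).2.2) ::
            ((if (pvFLR m).2.1 < (s.length : Int) then
              [PvItem.proc (PySem.List.slice s (some (pvFLR m).2.1) none)
                (some (pvDetect (PySem.List.slice s (some (pvFLR m).2.1) none)))]
             else []) ++ rest)) acc (by omega)
        simp only [Option.getD_some] at heq1
        rw [pvRecA_stable N (PySem.List.slice s none (some (pvFLR m).1))
          (m.map (fun row => PySem.List.slice row none (some (pvFLR m).1))) (by omega) hgoodp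
          ((PySem.List.slice s none (some (pvFLR m).1)).length + 1) s.length
          (by omega) (by omega)] at heq1
        simp only [List.nil_append, List.cons_append]
        rw [heq1, hemit]
        by_cases het : (pvFLR m).2.1 < (s.length : Int)
        case neg =>
          rw [if_neg het, if_neg het]
          simp only [List.nil_append]
          refine ⟨1 + c1, f1, by omega, by omega, ?_⟩
          congr 1
          simp
        case pos =>
          rw [if_pos het, if_pos het]
          simp only [List.singleton_append]
          obtain ⟨hgood2, hlen2⟩ := hpost het
          obtain ⟨c2, f2, hf2, hc2, heq2⟩ := ih (PySem.List.slice s (some (pvFLR m).2.1) none)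
            (some (pvDetect (PySem.List.slice s (some (pvFLR m).2.1) none)))
            (by omega) (by simpa using hgood2) f1 rest
            (((pvFLR m).2.1 - (pvFLR m).1, (pvFLR m).2.2) ::
              ((pvRecA s.length (PySem.List.slice s none (some (pvFLR m).1))
                (m.map (fun row => PySem.List.slice row none (some (pvFLR m).1)))).reverse ++ acc))
            (by omega)
          simp only [Option.getD_some] at heq2
          rw [pvRecA_stable N (PySem.List.slice s (some (pvFLR m).2.1) none)
            (pvDetect (PySem.List.slice s (some (pvFLR m).2.1) none)) (by omega) hgood2
            ((PySem.List.slice s (some (pvFLR m).2.1) none).length + 1) s.length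
            (by omega) (by omega)] at heq2
          refine ⟨1 + c1 + c2, f2, by omega, by omega, ?_⟩
          rw [heq2]
          congr 1
          simp

-- ===== VERDICT (by name: the statement is the Claim_ definition above) =====
theorem recurse_find_longest_repeat_spec : Claim_equal_recurse_find_longest_repeat := by
  intro seq matrix hdom hpre
  obtain ⟨hnone, hsome⟩ := hpre
  unfold Spec_recurse_find_longest_repeat recurse_find_longest_repeat recurse_find_longest_repeat_alt
  cases matrix with
  | none =>
    have hs : seq.toList ≠ [] := by
      intro h0
      exact (hnone rfl) (String.toList_eq_nil_iff.mp h0)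
    have hg : pvGood seq.toList (pvDetect seq.toList) := pvDetect_good _ hs
    obtain ⟨c, f', hf, hc, heq⟩ := pvRunB_key seq.toList.length seq.toList none
      (le_refl _) (by simpa using hg) (seq.toList.length + 1) [] [] (by omega)
    simp only [Option.getD_none] at heq ⊢
    rw [heq]
    simp [pvRunB]
  | some m =>
    obtain ⟨hm, hrows, hb⟩ := hsome m (by simp)
    have hsmall := pvFLR_small m hm hrows hb
    simp only [Option.getD_some, pvRecA, pvRunB]
    rw [if_pos (Or.inl hsmall), if_pos (Or.inl hsmall)]
    simp
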